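-- pv_equiv track=rewrite | github.com/CozyKim/code_practices | Programmers_CodeTest/kakao/lv3/lock_and_key.py | make_rotated_keys
-- ===== SOURCE A (Python) =====
-- def rotate_90_keys(key):
--     result = []
--     for j in range(len(key)):
--         tmp = []
--         for i in range(len(key) - 1, -1, -1):
--             tmp.append(key[i][j])
--         result.append(tmp[:])
--     return result
--
-- def find_axis(board):
--     axis = []
--     for i in range(len(board)):
--         for j in range(len(board)):
--             if board[i][j]:
--                 axis.append((i, j))
--     return axis
--
-- def make_rotated_keys(key):
--     result, axis = [], []
--     result.append(rotate_90_keys(key))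
--     for _ in range(3):
--         result.append(rotate_90_keys(result[-1]))
--     for board in result:
--         axis.append(find_axis(board))
--     return axis
-- ===== SOURCE B (Python) =====
-- def make_rotated_keys(key):
--     n = len(key)
--     r90 = [(j, n - 1 - i)
--            for j in range(n) for i in range(n - 1, -1, -1) if key[i][j]]
--     r180 = [(n - 1 - i, n - 1 - j)
--             for i in range(n - 1, -1, -1) for j in range(n - 1, -1, -1) if key[i][j]]
--     r270 = [(n - 1 - j, i)
--             for j in range(n - 1, -1, -1) for i in range(n) if key[i][j]]
--     r360 = [(i, j)
--             for i in range(n) for j in range(n) if key[i][j]]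
--     return [r90, r180, r270, r360]
-- ===== Notes on version B (the rewrite author's own statement) =====
-- stated objective: alternative
-- what changed: B never materialises any rotated matrix: it emits each rotation's set-cell coordinates directly from the original key via the four closed-form index maps, with loop directions chosen per rotation to reproduce A's row-major scan order.
import Mathlib
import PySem

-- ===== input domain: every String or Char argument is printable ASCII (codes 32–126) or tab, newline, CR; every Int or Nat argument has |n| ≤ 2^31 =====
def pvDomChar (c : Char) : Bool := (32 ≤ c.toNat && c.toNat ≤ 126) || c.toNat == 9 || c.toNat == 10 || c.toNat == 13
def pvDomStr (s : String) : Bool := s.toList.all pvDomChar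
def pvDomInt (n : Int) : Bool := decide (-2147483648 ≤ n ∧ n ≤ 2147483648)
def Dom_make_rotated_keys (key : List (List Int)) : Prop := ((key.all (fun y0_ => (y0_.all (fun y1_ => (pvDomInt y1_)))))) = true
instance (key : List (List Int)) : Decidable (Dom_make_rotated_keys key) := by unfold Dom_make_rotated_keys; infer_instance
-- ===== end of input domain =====

-- B builds no rotated matrices: it emits each rotation's cell coordinates directly via
-- closed-form index maps, with loop directions chosen to reproduce A's row-major scans.

-- ===== PORT A =====
def rotate_90_keys (key : List (List Int)) : List (List Int) :=
  (PySem.List.pyRange 0 (key.length : Int) 1).foldl (fun result j =>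
      result ++ [(PySem.List.pyRange ((key.length : Int) - 1) (-1) (-1)).foldl
        (fun tmp i => tmp ++ [PySem.List.pyGetD (PySem.List.pyGetD key i []) j 0]) []]) []

def find_axis (board : List (List Int)) : List (Int × Int) :=
  (PySem.List.pyRange 0 (board.length : Int) 1).foldl (fun axis i =>
    (PySem.List.pyRange 0 (board.length : Int) 1).foldl (fun axis j =>
      if PySem.List.pyGetD (PySem.List.pyGetD board i []) j 0 ≠ 0 then axis ++ [(i, j)]
      else axis) axis) []

def make_rotated_keys (key : List (List Int)) : List (List (Int × Int)) :=
  let result := [rotate_90_keys key]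
  let result := (PySem.List.pyRange 0 3 1).foldl
      (fun result _ => result ++ [rotate_90_keys (PySem.List.pyGetD result (-1) [])]) result
  result.foldl (fun axis board => axis ++ [find_axis board]) []

-- ===== PORT B =====
def make_rotated_keys_alt (key : List (List Int)) : List (List (Int × Int)) :=
  let n : Int := key.length
  let r90 := (PySem.List.pyRange 0 n 1).flatMap (fun j =>
      (PySem.List.pyRange (n - 1) (-1) (-1)).flatMap (fun i =>
        if PySem.List.pyGetD (PySem.List.pyGetD key i []) j 0 ≠ 0 then [(j, n - 1 - i)] else []))
  let r180 := (PySem.List.pyRange (n - 1) (-1) (-1)).flatMap (fun i =>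
      (PySem.List.pyRange (n - 1) (-1) (-1)).flatMap (fun j =>
        if PySem.List.pyGetD (PySem.List.pyGetD key i []) j 0 ≠ 0 then [(n - 1 - i, n - 1 - j)] else []))
  let r270 := (PySem.List.pyRange (n - 1) (-1) (-1)).flatMap (fun j =>
      (PySem.List.pyRange 0 n 1).flatMap (fun i =>
        if PySem.List.pyGetD (PySem.List.pyGetD key i []) j 0 ≠ 0 then [(n - 1 - j, i)] else []))
  let r360 := (PySem.List.pyRange 0 n 1).flatMap (fun i =>
      (PySem.List.pyRange 0 n 1).flatMap (fun j =>
        if PySem.List.pyGetD (PySem.List.pyGetD key i []) j 0 ≠ 0 then [(i, j)] else []))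
  [r90, r180, r270, r360]

-- ===== PRECONDITION & SPEC =====
-- Pre_ excludes exactly the inputs where the Python A raises IndexError (a row shorter
-- than the number of rows); B raises there too.
def Pre_make_rotated_keys (key : List (List Int)) : Prop :=
  ∀ row ∈ key, key.length ≤ row.length
instance (key : List (List Int)) : Decidable (Pre_make_rotated_keys key) := by
  unfold Pre_make_rotated_keys; infer_instance
def pvWitness_make_rotated_keys : List (List Int) := [[1, 0], [0, 1]]

def Spec_make_rotated_keys (key : List (List Int)) (out : List (List (Int × Int))) : Prop :=
  out = make_rotated_keys_alt key
instance (key : List (List Int)) (out : List (List (Int × Int))) : Decidable (Spec_make_rotated_keys key out) := by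
  unfold Spec_make_rotated_keys; infer_instance

-- ===== CLAIM (what is proved, stated in full; the proofs are below) =====
def Claim_equal_make_rotated_keys : Prop := ∀ (key : List (List Int)), Dom_make_rotated_keys key → Pre_make_rotated_keys key → Spec_make_rotated_keys key (make_rotated_keys key)

-- ===== LEMMAS AND PROOFS =====

-- the cell lookup both ports perform: key[i][j] with Python defaults
def pvCell (key : List (List Int)) (i j : Int) : Int :=
  PySem.List.pyGetD (PySem.List.pyGetD key i []) j 0

-- an n×n matrix given by a coordinate function
def pvMat (n : Nat) (f : Nat → Nat → Int) : List (List Int) :=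
  (List.range n).map (fun a => (List.range n).map (fun b => f a b))

-- row-major coordinates of nonzero cells of the matrix described by f
def pvAxis (n : Nat) (f : Nat → Nat → Int) : List (Int × Int) :=
  (List.range n).flatMap (fun a => (List.range n).flatMap (fun b =>
    if f a b ≠ 0 then [((a : Int), (b : Int))] else []))

lemma pvMat_length (n : Nat) (f : Nat → Nat → Int) : (pvMat n f).length = n := by
  simp [pvMat]

lemma pvMat_get (n : Nat) (f : Nat → Nat → Int) (a b : Nat) (ha : a < n) (hb : b < n) :
    PySem.List.pyGetD (PySem.List.pyGetD (pvMat n f) ((a : Nat) : Int) []) ((b : Nat) : Int) 0 = f a b := by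
  simp [pvMat, PySem.List.pyGetD_natCast, List.getD_eq_getElem?_getD, ha, hb]

lemma pvMat_congr (n : Nat) (f g : Nat → Nat → Int)
    (h : ∀ a < n, ∀ b < n, f a b = g a b) : pvMat n f = pvMat n g := by
  unfold pvMat
  refine List.map_congr_left (fun a ha => ?_)
  refine List.map_congr_left (fun b hb => ?_)
  exact h a (List.mem_range.mp ha) b (List.mem_range.mp hb)

-- glue: PySem.List.foldl_append_if restated for a Prop-valued condition (the ports' ite)
lemma pvFoldl_append_ite {α β : Type} (p : α → Prop) [DecidablePred p] (f : α → β)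
    (l : List α) (acc : List β) :
    l.foldl (fun acc x => if p x then acc ++ [f x] else acc) acc
      = acc ++ (l.filter (fun x => decide (p x))).map f := by
  have h := PySem.List.foldl_append_if (fun x => decide (p x)) f l acc
  simpa using h

-- glue: a Prop-ite filter·map written as a flatMap
lemma pvFlatMap_if {α β : Type} (p : α → Prop) [DecidablePred p] (e : α → β) (l : List α) :
    l.flatMap (fun x => if p x then [e x] else []) = (l.filter (fun x => decide (p x))).map e := by
  induction l with
  | nil => rfl
  | cons x xs ih => by_cases h : p x <;> simp [h, ih]

-- countdown range used by both ports, in reindexed form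
lemma pvRange_countdown (n : Nat) :
    PySem.List.pyRange ((n : Int) - 1) (-1) (-1) = (List.range n).map (fun (k : Nat) => (n : Int) - 1 - (k : Int)) := by
  rw [PySem.List.pyRange_neg_one]
  have h : ((n : Int) - 1 - (-1)).toNat = n := by omega
  rw [h]

-- rotate_90_keys characterised as a coordinate-function matrix
lemma rotate_spec (M : List (List Int)) :
    rotate_90_keys M = pvMat M.length (fun a b =>
      PySem.List.pyGetD (PySem.List.pyGetD M ((M.length : Int) - 1 - b) []) ((a : Nat) : Int) 0) := by
  unfold rotate_90_keys pvMat
  rw [PySem.List.pyRange_zero_nat, pvRange_countdown]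
  simp only [PySem.List.foldl_append_singleton_eq_map, List.nil_append, List.map_map]
  simp [Function.comp_def]

lemma rotate_pvMat (n : Nat) (f : Nat → Nat → Int) :
    rotate_90_keys (pvMat n f) = pvMat n (fun a b => f (n - 1 - b) a) := by
  rw [rotate_spec, pvMat_length]
  refine pvMat_congr n _ _ (fun a ha b hb => ?_)
  have h1 : (n : Int) - 1 - (b : Nat) = ((n - 1 - b : Nat) : Int) := by omega
  rw [h1, pvMat_get n f _ a (by omega) ha]

-- find_axis characterised on coordinate-function matrices
lemma find_axis_pvMat (n : Nat) (f : Nat → Nat → Int) :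
    find_axis (pvMat n f) = pvAxis n f := by
  unfold find_axis pvAxis
  rw [pvMat_length, PySem.List.pyRange_zero_nat]
  simp only [List.foldl_map, pvFoldl_append_ite, PySem.List.foldl_append_eq_flatMap,
    List.nil_append]
  refine List.flatMap_congr (fun a ha => ?_)
  rw [pvFlatMap_if]
  refine congrArg _ (List.filter_congr (fun b hb => ?_))
  rw [pvMat_get n f a b (List.mem_range.mp ha) (List.mem_range.mp hb)]

-- the four rotation coordinate functions of a key
def pvF1 (key : List (List Int)) (n : Nat) (a b : Nat) : Int := pvCell key ((n : Int) - 1 - b) a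
def pvF2 (key : List (List Int)) (n : Nat) (a b : Nat) : Int := pvCell key ((n : Int) - 1 - a) ((n : Int) - 1 - b)
def pvF3 (key : List (List Int)) (n : Nat) (a b : Nat) : Int := pvCell key b ((n : Int) - 1 - a)
def pvF4 (key : List (List Int)) (_n : Nat) (a b : Nat) : Int := pvCell key a b

lemma rotate1 (key : List (List Int)) :
    rotate_90_keys key = pvMat key.length (pvF1 key key.length) := by
  rw [rotate_spec]; rfl

lemma rotate2 (key : List (List Int)) :
    rotate_90_keys (pvMat key.length (pvF1 key key.length)) = pvMat key.length (pvF2 key key.length) := by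
  rw [rotate_pvMat]
  refine pvMat_congr _ _ _ (fun a ha b hb => ?_)
  unfold pvF1 pvF2
  congr 1 <;> omega

lemma rotate3 (key : List (List Int)) :
    rotate_90_keys (pvMat key.length (pvF2 key key.length)) = pvMat key.length (pvF3 key key.length) := by
  rw [rotate_pvMat]
  refine pvMat_congr _ _ _ (fun a ha b hb => ?_)
  unfold pvF2 pvF3
  congr 1 <;> omega

lemma rotate4 (key : List (List Int)) :
    rotate_90_keys (pvMat key.length (pvF3 key key.length)) = pvMat key.length (pvF4 key key.length) := by
  rw [rotate_pvMat]
  refine pvMat_congr _ _ _ (fun a ha b hb => ?_)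
  unfold pvF3 pvF4
  congr 1 <;> omega

-- A in closed form
lemma make_rotated_keys_eq (key : List (List Int)) :
    make_rotated_keys key =
      [pvAxis key.length (pvF1 key key.length), pvAxis key.length (pvF2 key key.length),
       pvAxis key.length (pvF3 key key.length), pvAxis key.length (pvF4 key key.length)] := by
  simp only [make_rotated_keys]
  have h3 : PySem.List.pyRange 0 3 1 = [0, 1, 2] := by decide
  rw [h3]
  simp only [List.foldl_cons, List.foldl_nil]
  have e1 : PySem.List.pyGetD [rotate_90_keys key] (-1) ([] : List (List Int))
      = rotate_90_keys key := by
    simpa using PySem.List.pyGetD_neg_one_append_singleton ([] : List (List (List Int)))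
      (rotate_90_keys key) ([] : List (List Int))
  rw [e1]
  simp only [PySem.List.pyGetD_neg_one_append_singleton]
  simp only [PySem.List.foldl_append_singleton_eq_map, List.nil_append, List.map_append,
    List.map_cons, List.map_nil]
  rw [rotate1 key, rotate2 key, rotate3 key, rotate4 key]
  simp [find_axis_pvMat]

-- B's four comprehensions in the same closed form
lemma alt_eq (key : List (List Int)) :
    make_rotated_keys_alt key =
      [pvAxis key.length (pvF1 key key.length), pvAxis key.length (pvF2 key key.length),
       pvAxis key.length (pvF3 key key.length), pvAxis key.length (pvF4 key key.length)] := by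
  simp only [make_rotated_keys_alt]
  rw [PySem.List.pyRange_zero_nat, pvRange_countdown]
  simp only [List.flatMap_map]
  unfold pvAxis pvF1 pvF2 pvF3 pvF4 pvCell
  refine congrArg₂ _ ?_ (congrArg₂ _ ?_ (congrArg₂ _ ?_ (congrArg₂ _ ?_ rfl))) <;>
    refine List.flatMap_congr (fun a _ => ?_) <;>
    refine List.flatMap_congr (fun b _ => ?_) <;>
    · first
      | rfl
      | (dsimp only [Function.comp_def]
         split_ifs with h
         · first
           | rfl
           | (simp only [List.cons.injEq, Prod.mk.injEq, true_and, and_true]; omega)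
         · rfl)

-- ===== VERDICT (by name: the statement is the Claim_ definition above) =====
theorem make_rotated_keys_spec : Claim_equal_make_rotated_keys := by
  intro key _ _
  unfold Spec_make_rotated_keys
  rw [make_rotated_keys_eq, alt_eq]
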